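-- pv_equiv track=rewrite | github.com/ros/rosdistro | test/rosdep_repo_check/__init__.py | summarize_broken_packages
-- ===== SOURCE A (Python) =====
-- def fmt_os(os_name, os_code_name):
--     return (os_name + ' ' + os_code_name) if os_code_name else os_name
--
-- def summarize_broken_packages(broken):
--     """
--     Create human-readable summary regarding missing packages.
--
--     :param broken: tuples with information about the broken packages.
--
--     :returns: the human-readable summary.
--     """
--     # Group and sort by os, version, arch, key
--     grouped = {}
--
--     for os_name, os_ver, os_arch, key, package, _ in broken:
--         platform = '%s on %s' % (fmt_os(os_name, os_ver), os_arch)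
--         if platform not in grouped:
--             grouped[platform] = set()
--         grouped[platform].add('- Package %s for rosdep key %s' % (package, key))
--
--     return '\n\n'.join(
--         '* The following %d packages were not found for %s:\n%s' % (
--             len(pkg_msgs), platform, '\n'.join(sorted(pkg_msgs)))
--         for platform, pkg_msgs in sorted(grouped.items()))
-- ===== SOURCE B (Python) =====
-- def summarize_broken_packages(broken):
--     """
--     Create human-readable summary regarding missing packages.
--
--     :param broken: tuples with information about the broken packages.
--
--     :returns: the human-readable summary.
--     """
--     # One flat pass building (platform, message) pairs, then a scan over the
--     # sorted distinct platforms, filtering the pairs per platform.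
--     pairs = [
--         ('%s on %s' % (os_name + ' ' + os_ver if os_ver else os_name, os_arch),
--          '- Package %s for rosdep key %s' % (package, key))
--         for os_name, os_ver, os_arch, key, package, _ in broken
--     ]
--     blocks = []
--     for platform in sorted(set(p for p, _ in pairs)):
--         msgs = sorted(set(m for p, m in pairs if p == platform))
--         blocks.append('* The following %d packages were not found for %s:\n%s'
--                       % (len(msgs), platform, '\n'.join(msgs)))
--     return '\n\n'.join(blocks)
-- ===== Notes on version B (the rewrite author's own statement) =====
-- stated objective: alternative
-- what changed: Replaces the dict-of-sets hash grouping with a flat (platform, message) pair list that is grouped by scanning the sorted distinct platforms and filtering pairs per platform.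
import Mathlib
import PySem

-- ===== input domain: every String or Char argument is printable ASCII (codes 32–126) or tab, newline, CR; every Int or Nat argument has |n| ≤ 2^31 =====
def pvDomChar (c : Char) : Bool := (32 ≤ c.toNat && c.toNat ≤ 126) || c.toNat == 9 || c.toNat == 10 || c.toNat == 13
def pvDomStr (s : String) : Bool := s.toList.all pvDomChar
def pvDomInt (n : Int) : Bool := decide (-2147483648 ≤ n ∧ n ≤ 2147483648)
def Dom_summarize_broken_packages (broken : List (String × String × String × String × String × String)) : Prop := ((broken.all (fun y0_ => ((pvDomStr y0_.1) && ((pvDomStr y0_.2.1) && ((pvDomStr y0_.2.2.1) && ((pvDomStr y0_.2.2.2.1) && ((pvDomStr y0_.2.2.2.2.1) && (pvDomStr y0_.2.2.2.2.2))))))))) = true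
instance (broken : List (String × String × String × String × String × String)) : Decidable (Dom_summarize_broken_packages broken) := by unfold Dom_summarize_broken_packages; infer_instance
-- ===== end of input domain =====

-- B replaces A's dict-of-sets hash grouping by a flat (platform, message) pair list
-- scanned per sorted distinct platform; equal output proved for all inputs.

-- ===== PORT A =====
def pv_fmt_os (os_name os_code_name : String) : String :=
  if os_code_name ≠ "" then os_name ++ " " ++ os_code_name else os_name

def summarize_broken_packages (broken : List (String × String × String × String × String × String)) : String :=
  let grouped : PySem.Dict String (PySem.Set String) :=
    broken.foldl (fun grouped t =>
      let platform := pv_fmt_os t.1 t.2.1 ++ " on " ++ t.2.2.1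
      let grouped := if grouped.contains platform then grouped
                     else grouped.insert platform PySem.Set.empty
      grouped.insert platform
        (PySem.Set.add (grouped.getD platform PySem.Set.empty)
          ("- Package " ++ t.2.2.2.2.1 ++ " for rosdep key " ++ t.2.2.2.1)))
      PySem.Dict.empty
  -- dict keys are distinct, so Python's tuple sort of grouped.items() orders by the platform alone
  PySem.Str.join "\n\n"
    ((PySem.List.sorted grouped.items (fun p => p.1) false).map
      (fun p => "* The following " ++ PySem.Int.toStr (p.2.length : Int) ++
        " packages were not found for " ++ p.1 ++ ":\n" ++
        PySem.Str.join "\n" (PySem.List.sorted p.2 (fun m => m) false)))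

-- ===== PORT B =====
def summarize_broken_packages_alt (broken : List (String × String × String × String × String × String)) : String :=
  let pairs : List (String × String) :=
    broken.map (fun t =>
      ((if t.2.1 ≠ "" then t.1 ++ " " ++ t.2.1 else t.1) ++ " on " ++ t.2.2.1,
       "- Package " ++ t.2.2.2.2.1 ++ " for rosdep key " ++ t.2.2.2.1))
  let blocks :=
    (PySem.List.sorted (PySem.Set.ofList (pairs.map (fun p => p.1))) (fun x => x) false).map
      (fun platform =>
        let msgs := PySem.List.sorted
          (PySem.Set.ofList ((pairs.filter (fun p => p.1 == platform)).map (fun p => p.2)))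
          (fun x => x) false
        "* The following " ++ PySem.Int.toStr (msgs.length : Int) ++
          " packages were not found for " ++ platform ++ ":\n" ++
          PySem.Str.join "\n" msgs)
  PySem.Str.join "\n\n" blocks

-- ===== PRECONDITION & SPEC =====
def Spec_summarize_broken_packages (broken : List (String × String × String × String × String × String)) (out : String) : Prop := out = summarize_broken_packages_alt broken
instance (broken : List (String × String × String × String × String × String)) (out : String) : Decidable (Spec_summarize_broken_packages broken out) := by unfold Spec_summarize_broken_packages; infer_instance

-- ===== CLAIM (what is proved, stated in full; the proofs are below) =====
def Claim_equal_summarize_broken_packages : Prop := ∀ (broken : List (String × String × String × String × String × String)), Dom_summarize_broken_packages broken → Spec_summarize_broken_packages broken (summarize_broken_packages broken)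

-- ===== LEMMAS AND PROOFS =====

-- proof-side abbreviations for the platform and message strings of one tuple
def pvPl (t : String × String × String × String × String × String) : String :=
  pv_fmt_os t.1 t.2.1 ++ " on " ++ t.2.2.1

def pvMsg (t : String × String × String × String × String × String) : String :=
  "- Package " ++ t.2.2.2.2.1 ++ " for rosdep key " ++ t.2.2.2.1

-- the distinct messages recorded for platform p after processing l
def pvF (l : List (String × String × String × String × String × String)) (p : String) : PySem.Set String :=
  PySem.Set.ofList ((l.filter (fun t => pvPl t == p)).map pvMsg)

lemma pv_ofList_append (xs : List String) (x : String) :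
    PySem.Set.ofList (xs ++ [x]) = PySem.Set.add (PySem.Set.ofList xs) x := by
  rw [PySem.Set.ofList_eq_foldl, List.foldl_append, ← PySem.Set.ofList_eq_foldl,
    List.foldl_cons, List.foldl_nil]

lemma pv_items_fold (l : List (String × String × String × String × String × String)) :
    (l.foldl (fun grouped t =>
      let platform := pv_fmt_os t.1 t.2.1 ++ " on " ++ t.2.2.1
      let grouped := if grouped.contains platform then grouped
                     else grouped.insert platform PySem.Set.empty
      grouped.insert platform
        (PySem.Set.add (grouped.getD platform PySem.Set.empty)
          ("- Package " ++ t.2.2.2.2.1 ++ " for rosdep key " ++ t.2.2.2.1)))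
      PySem.Dict.empty).items =
    (PySem.Set.ofList (l.map pvPl)).map (fun p => (p, pvF l p)) := by
  induction l using List.reverseRecOn with
  | nil => rfl
  | append_singleton l t ih =>
    rw [List.foldl_append, List.foldl_cons, List.foldl_nil]
    set G := l.foldl (fun grouped t =>
      let platform := pv_fmt_os t.1 t.2.1 ++ " on " ++ t.2.2.1
      let grouped := if grouped.contains platform then grouped
                     else grouped.insert platform PySem.Set.empty
      grouped.insert platform
        (PySem.Set.add (grouped.getD platform PySem.Set.empty)
          ("- Package " ++ t.2.2.2.2.1 ++ " for rosdep key " ++ t.2.2.2.1)))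
      PySem.Dict.empty with hG
    show ((if G.contains (pvPl t) = true then G else G.insert (pvPl t) PySem.Set.empty).insert (pvPl t)
      (PySem.Set.add ((if G.contains (pvPl t) = true then G else G.insert (pvPl t) PySem.Set.empty).getD (pvPl t) PySem.Set.empty)
        (pvMsg t))).items =
      (PySem.Set.ofList ((l ++ [t]).map pvPl)).map (fun p => (p, pvF (l ++ [t]) p))
    have hkeys : G.keys = PySem.Set.ofList (l.map pvPl) := by
      have hid : ((fun x : String × PySem.Set String => x.1) ∘ fun p => (p, pvF l p)) = fun p => p := rfl
      simp only [PySem.Dict.keys, ih, List.map_map, hid, List.map_id']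
    have hnd : G.keys.Nodup := by rw [hkeys]; exact PySem.Set.nodup_ofList _
    have hF' : ∀ p, pvF (l ++ [t]) p =
        if p = pvPl t then PySem.Set.add (pvF l p) (pvMsg t) else pvF l p := by
      intro p
      unfold pvF
      rw [List.filter_append]
      by_cases hp : p = pvPl t
      · subst hp
        rw [if_pos rfl]
        have h1 : List.filter (fun t' => pvPl t' == pvPl t) [t] = [t] := by simp
        rw [h1, List.map_append, List.map_cons, List.map_nil, pv_ofList_append]
      · rw [if_neg hp]
        have hb : (pvPl t == p) = false := beq_eq_false_iff_ne.mpr (fun e => hp e.symm)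
        have h1 : List.filter (fun t' => pvPl t' == p) [t] = [] := by
          simp [hb]
        rw [h1, List.append_nil]
    rw [List.map_append, List.map_cons, List.map_nil, pv_ofList_append]
    by_cases h : pvPl t ∈ l.map pvPl
    · have hmemS : pvPl t ∈ PySem.Set.ofList (l.map pvPl) := (PySem.Set.mem_ofList _ _).2 h
      have hc : G.contains (pvPl t) = true := by
        rw [PySem.Dict.contains_eq_decide_mem_keys, hkeys]
        simpa using hmemS
      rw [if_pos hc]
      have hmem : (pvPl t, pvF l (pvPl t)) ∈ G.items := by
        rw [ih]; exact List.mem_map_of_mem hmemS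
      have hgetD : G.getD (pvPl t) PySem.Set.empty = pvF l (pvPl t) :=
        PySem.Dict.getD_of_mem_items _ hmem hnd _
      have hadd : PySem.Set.add (PySem.Set.ofList (l.map pvPl)) (pvPl t) = PySem.Set.ofList (l.map pvPl) := by
        simp [PySem.Set.add, PySem.Set.contains, hmemS]
      rw [hgetD, PySem.Dict.items_insert_of_contains _ _ hc, ih, List.map_map, hadd]
      apply List.map_congr_left
      intro p hp
      by_cases hpe : p = pvPl t
      · subst hpe
        simp only [Function.comp_apply, beq_self_eq_true, if_true, hF']
      · have hb : (p == pvPl t) = false := beq_eq_false_iff_ne.mpr hpe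
        simp only [Function.comp_apply, hb, Bool.false_eq_true, if_false, hF', if_neg hpe]
    · have hnmemS : pvPl t ∉ PySem.Set.ofList (l.map pvPl) := fun c => h ((PySem.Set.mem_ofList _ _).1 c)
      have hc : G.contains (pvPl t) = false := by
        rw [PySem.Dict.contains_eq_decide_mem_keys, hkeys]
        simpa using hnmemS
      rw [if_neg (by simp [hc])]
      have hone : PySem.Set.add ((G.insert (pvPl t) PySem.Set.empty).getD (pvPl t) PySem.Set.empty) (pvMsg t) = [pvMsg t] := by
        rw [PySem.Dict.getD_insert_self]; rfl
      rw [hone, PySem.Dict.insert_insert_self,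
        PySem.Dict.items_insert_of_not_contains _ _ hc, ih]
      have hadd : PySem.Set.add (PySem.Set.ofList (l.map pvPl)) (pvPl t) = PySem.Set.ofList (l.map pvPl) ++ [pvPl t] := by
        simp [PySem.Set.add, PySem.Set.contains, hnmemS]
      rw [hadd, List.map_append, List.map_cons, List.map_nil]
      congr 1
      · apply List.map_congr_left
        intro p hp
        have hpe : p ≠ pvPl t := fun e => h (e ▸ (PySem.Set.mem_ofList _ _).1 hp)
        rw [hF', if_neg hpe]
      · have hfl : List.filter (fun t' => pvPl t' == pvPl t) l = [] := by
          rw [List.filter_eq_nil_iff]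
          intro a ha hb
          exact h ((eq_of_beq hb) ▸ List.mem_map_of_mem ha)
        have : pvF (l ++ [t]) (pvPl t) = [pvMsg t] := by
          rw [hF', if_pos rfl]
          unfold pvF
          rw [hfl]
          rfl
        rw [this]

lemma pv_main (broken : List (String × String × String × String × String × String)) :
    summarize_broken_packages broken = summarize_broken_packages_alt broken := by
  simp only [summarize_broken_packages, summarize_broken_packages_alt]
  rw [pv_items_fold]
  have hpairs1 : (broken.map (fun t =>
      ((if t.2.1 ≠ "" then t.1 ++ " " ++ t.2.1 else t.1) ++ " on " ++ t.2.2.1,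
       "- Package " ++ t.2.2.2.2.1 ++ " for rosdep key " ++ t.2.2.2.1))).map (fun p => p.1) =
      broken.map pvPl := by
    rw [List.map_map]; rfl
  have hpairs2 : ∀ pl, ((broken.map (fun t =>
      ((if t.2.1 ≠ "" then t.1 ++ " " ++ t.2.1 else t.1) ++ " on " ++ t.2.2.1,
       "- Package " ++ t.2.2.2.2.1 ++ " for rosdep key " ++ t.2.2.2.1))).filter
        (fun p => p.1 == pl)).map (fun p => p.2) =
      (broken.filter (fun t => pvPl t == pl)).map pvMsg := by
    intro pl
    rw [List.filter_map, List.map_map]; rfl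
  rw [hpairs1]
  have hsorted : PySem.List.sorted
      ((PySem.Set.ofList (broken.map pvPl)).map (fun p => (p, pvF broken p))) (fun p => p.1) false =
      (PySem.List.sorted (PySem.Set.ofList (broken.map pvPl)) (fun x => x) false).map
        (fun p => (p, pvF broken p)) := by
    apply PySem.List.sorted_eq_of_perm_of_pairwise_lt
    · exact List.Perm.map _ (PySem.List.sorted_perm _ _ _)
    · exact List.Pairwise.map _ (fun a b hab => hab) (PySem.List.sorted_ofList_pairwise_lt _)
  rw [hsorted, List.map_map]
  congr 1
  apply List.map_congr_left
  intro p hp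
  show "* The following " ++ PySem.Int.toStr ((pvF broken p).length : Int) ++
      " packages were not found for " ++ p ++ ":\n" ++
      PySem.Str.join "\n" (PySem.List.sorted (pvF broken p) (fun m => m) false) = _
  rw [hpairs2 p]
  show _ = "* The following " ++
      PySem.Int.toStr ((PySem.List.sorted (pvF broken p) (fun x => x) false).length : Int) ++
      " packages were not found for " ++ p ++ ":\n" ++
      PySem.Str.join "\n" (PySem.List.sorted (pvF broken p) (fun x => x) false)
  rw [PySem.List.length_sorted]

-- ===== VERDICT (by name: the statement is the Claim_ definition above) =====
theorem summarize_broken_packages_spec : Claim_equal_summarize_broken_packages := by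
  intro broken _
  unfold Spec_summarize_broken_packages
  exact pv_main broken
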